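-- pv_equiv track=rewrite | github.com/OrensteinLab/Sclerostin | code/sort_sclerostin.py | IUPAC
-- ===== SOURCE A (Python) =====
-- def IUPAC(seq1, seq2):
--     new_seq = ''
--     if len(seq1) == len(seq2):
--         for i in range(len(seq1)):
--             if seq1[i] == seq2[i]:
--                 new_seq += seq1[i]
--             elif (seq1[i] == 'A' and seq2[i] == 'G') or (seq2[i] == 'A' and seq1[i] == 'G'):
--                 new_seq += 'R'
--             elif (seq1[i] == 'C' and seq2[i] == 'T') or (seq2[i] == 'C' and seq1[i] == 'T'):
--                 new_seq += 'Y'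
--             elif (seq1[i] == 'G' and seq2[i] == 'C') or (seq2[i] == 'G' and seq1[i] == 'C'):
--                 new_seq += 'S'
--             elif (seq1[i] == 'A' and seq2[i] == 'T') or (seq2[i] == 'A' and seq1[i] == 'T'):
--                 new_seq += 'W'
--             elif (seq1[i] == 'G' and seq2[i] == 'T') or (seq2[i] == 'G' and seq1[i] == 'T'):
--                 new_seq += 'K'
--             elif (seq1[i] == 'A' and seq2[i] == 'C') or (seq2[i] == 'A' and seq1[i] == 'C'):
--                 new_seq += 'M'
--             else:
--                 new_seq += 'N'
--     return new_seq
-- ===== SOURCE B (Python) =====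
-- # Bit flags: each base is a 4-bit flag (A=1, C=2, G=4, T=8); the ambiguity
-- # code of two different characters is read off a flat 16-entry array indexed by
-- # the bitwise OR of their flags.  Non-ACGT characters encode as 0, so any
-- # unequal pair without two distinct base flags lands on an 'N' slot.
-- _FLAG = {'A': 1, 'C': 2, 'G': 4, 'T': 8}
-- #           0    1    2    3    4    5    6    7    8    9   10   11   12   13   14   15
-- _DECODE = ['N', 'N', 'N', 'M', 'N', 'R', 'S', 'N', 'N', 'W', 'Y', 'N', 'K', 'N', 'N', 'N']
--
-- def IUPAC(seq1, seq2):
--     if len(seq1) != len(seq2):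
--         return ''
--     return ''.join(
--         a if a == b else _DECODE[_FLAG.get(a, 0) | _FLAG.get(b, 0)]
--         for a, b in zip(seq1, seq2)
--     )
-- ===== Notes on version B (the rewrite author's own statement) =====
-- stated objective: faster
-- what changed: Replaced the six-branch if/elif cascade over indices with a bit-flag encoding: each base maps to a 4-bit flag (A=1,C=2,G=4,T=8) and the code of an unequal pair is read from a flat 16-entry decode array indexed by the bitwise OR of the two flags, via a zip comprehension joined once instead of repeated string concatenation.
import Mathlib
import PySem

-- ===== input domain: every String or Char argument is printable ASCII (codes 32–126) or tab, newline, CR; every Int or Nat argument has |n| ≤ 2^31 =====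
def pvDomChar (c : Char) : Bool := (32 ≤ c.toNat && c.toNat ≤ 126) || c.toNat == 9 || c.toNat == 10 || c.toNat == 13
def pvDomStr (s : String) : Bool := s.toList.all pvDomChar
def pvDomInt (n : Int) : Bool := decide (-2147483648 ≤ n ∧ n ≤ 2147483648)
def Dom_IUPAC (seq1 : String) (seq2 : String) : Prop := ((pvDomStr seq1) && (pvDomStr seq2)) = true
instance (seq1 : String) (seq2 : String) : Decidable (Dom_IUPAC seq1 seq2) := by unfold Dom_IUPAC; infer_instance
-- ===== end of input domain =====

-- B replaces A's six-branch if/elif cascade over indices by a bit-flag encoding: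
-- each base is a 4-bit flag (A=1, C=2, G=4, T=8) and the code of an unequal pair is
-- read from a flat 16-entry decode array indexed by the OR of the flags (objective: faster, measured).

-- ===== PORT A =====
def IUPAC (seq1 : String) (seq2 : String) : String :=
  String.ofList (
    if seq1.toList.length == seq2.toList.length then
      (PySem.List.pyRange 0 (seq1.toList.length : Int) 1).foldl (fun acc i =>
        acc ++ [if PySem.List.pyGetD seq1.toList i '?' == PySem.List.pyGetD seq2.toList i '?' then
            PySem.List.pyGetD seq1.toList i '?'
          else if PySem.List.pyGetD seq1.toList i '?' == 'A' && PySem.List.pyGetD seq2.toList i '?' == 'G' || PySem.List.pyGetD seq2.toList i '?' == 'A' && PySem.List.pyGetD seq1.toList i '?' == 'G' then 'R'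
          else if PySem.List.pyGetD seq1.toList i '?' == 'C' && PySem.List.pyGetD seq2.toList i '?' == 'T' || PySem.List.pyGetD seq2.toList i '?' == 'C' && PySem.List.pyGetD seq1.toList i '?' == 'T' then 'Y'
          else if PySem.List.pyGetD seq1.toList i '?' == 'G' && PySem.List.pyGetD seq2.toList i '?' == 'C' || PySem.List.pyGetD seq2.toList i '?' == 'G' && PySem.List.pyGetD seq1.toList i '?' == 'C' then 'S'
          else if PySem.List.pyGetD seq1.toList i '?' == 'A' && PySem.List.pyGetD seq2.toList i '?' == 'T' || PySem.List.pyGetD seq2.toList i '?' == 'A' && PySem.List.pyGetD seq1.toList i '?' == 'T' then 'W'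
          else if PySem.List.pyGetD seq1.toList i '?' == 'G' && PySem.List.pyGetD seq2.toList i '?' == 'T' || PySem.List.pyGetD seq2.toList i '?' == 'G' && PySem.List.pyGetD seq1.toList i '?' == 'T' then 'K'
          else if PySem.List.pyGetD seq1.toList i '?' == 'A' && PySem.List.pyGetD seq2.toList i '?' == 'C' || PySem.List.pyGetD seq2.toList i '?' == 'A' && PySem.List.pyGetD seq1.toList i '?' == 'C' then 'M'
          else 'N']) ([] : List Char)
    else [])

-- ===== PORT B =====
-- _FLAG.get(c, 0) of Source B
def iupacFlag (c : Char) : Nat :=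
  if c == 'A' then 1 else if c == 'C' then 2 else if c == 'G' then 4 else if c == 'T' then 8 else 0

-- _DECODE of Source B; the OR of two flags is always < 16, so the indexing is in range
def iupacDecode : List Char :=
  ['N', 'N', 'N', 'M', 'N', 'R', 'S', 'N', 'N', 'W', 'Y', 'N', 'K', 'N', 'N', 'N']

def IUPAC_alt (seq1 : String) (seq2 : String) : String :=
  if seq1.toList.length ≠ seq2.toList.length then ""
  else String.ofList ((seq1.toList.zip seq2.toList).map
    (fun p => if p.1 == p.2 then p.1
      else iupacDecode.getD (iupacFlag p.1 ||| iupacFlag p.2) 'N'))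

-- ===== PRECONDITION & SPEC =====
def Spec_IUPAC (seq1 : String) (seq2 : String) (out : String) : Prop := out = IUPAC_alt seq1 seq2
instance (seq1 : String) (seq2 : String) (out : String) : Decidable (Spec_IUPAC seq1 seq2 out) := by unfold Spec_IUPAC; infer_instance

-- ===== CLAIM (what is proved, stated in full; the proofs are below) =====
def Claim_equal_IUPAC : Prop := ∀ (seq1 : String) (seq2 : String), Dom_IUPAC seq1 seq2 → Spec_IUPAC seq1 seq2 (IUPAC seq1 seq2)

-- ===== LEMMAS AND PROOFS =====

-- per-character agreement of A's if/elif cascade with B's flag/decode lookup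
theorem iupac_char_case (a b : Char) :
    (if a == b then a
      else if a == 'A' && b == 'G' || b == 'A' && a == 'G' then 'R'
      else if a == 'C' && b == 'T' || b == 'C' && a == 'T' then 'Y'
      else if a == 'G' && b == 'C' || b == 'G' && a == 'C' then 'S'
      else if a == 'A' && b == 'T' || b == 'A' && a == 'T' then 'W'
      else if a == 'G' && b == 'T' || b == 'G' && a == 'T' then 'K'
      else if a == 'A' && b == 'C' || b == 'A' && a == 'C' then 'M'
      else 'N')
    = (if a == b then a else iupacDecode.getD (iupacFlag a ||| iupacFlag b) 'N') := by
  by_cases h : a = b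
  · simp [h]
  · have hne : (a == b) = false := by simpa using h
    simp only [hne, Bool.false_eq_true, if_false]
    cases ha1 : (a == 'A') <;> cases ha2 : (a == 'C') <;> cases ha3 : (a == 'G') <;>
      cases ha4 : (a == 'T') <;> cases hb1 : (b == 'A') <;> cases hb2 : (b == 'C') <;>
      cases hb3 : (b == 'G') <;> cases hb4 : (b == 'T') <;>
      simp_all [iupacFlag, iupacDecode]

-- the indexed map over range(len) equals the map over the zip, for equal lengths
theorem map_pyRange_eq_map_zip (f : Char → Char → Char) (d : Char) (l1 l2 : List Char)
    (hlen : l1.length = l2.length) :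
    (PySem.List.pyRange 0 (l1.length : Int) 1).map
      (fun i => f (PySem.List.pyGetD l1 i d) (PySem.List.pyGetD l2 i d))
    = (l1.zip l2).map (fun p => f p.1 p.2) := by
  rw [PySem.List.pyRange_one]
  simp only [List.map_map]
  apply List.ext_getElem
  · simp [hlen]
  · intro k hk1 hk2
    simp only [List.getElem_map, List.getElem_range, Function.comp_apply, zero_add,
      PySem.List.pyGetD_natCast, List.getElem_zip]
    have hk1' : k < l1.length := by simpa [hlen] using hk2
    have hk2' : k < l2.length := by omega
    rw [List.getD_eq_getElem l1 d hk1', List.getD_eq_getElem l2 d hk2']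

-- A's loop body over range(len) equals B's map over the zip
theorem iupac_core (l1 l2 : List Char) (h : l1.length = l2.length) :
    (PySem.List.pyRange 0 (l1.length : Int) 1).foldl (fun acc i =>
        acc ++ [if PySem.List.pyGetD l1 i '?' == PySem.List.pyGetD l2 i '?' then
            PySem.List.pyGetD l1 i '?'
          else if PySem.List.pyGetD l1 i '?' == 'A' && PySem.List.pyGetD l2 i '?' == 'G' || PySem.List.pyGetD l2 i '?' == 'A' && PySem.List.pyGetD l1 i '?' == 'G' then 'R'
          else if PySem.List.pyGetD l1 i '?' == 'C' && PySem.List.pyGetD l2 i '?' == 'T' || PySem.List.pyGetD l2 i '?' == 'C' && PySem.List.pyGetD l1 i '?' == 'T' then 'Y'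
          else if PySem.List.pyGetD l1 i '?' == 'G' && PySem.List.pyGetD l2 i '?' == 'C' || PySem.List.pyGetD l2 i '?' == 'G' && PySem.List.pyGetD l1 i '?' == 'C' then 'S'
          else if PySem.List.pyGetD l1 i '?' == 'A' && PySem.List.pyGetD l2 i '?' == 'T' || PySem.List.pyGetD l2 i '?' == 'A' && PySem.List.pyGetD l1 i '?' == 'T' then 'W'
          else if PySem.List.pyGetD l1 i '?' == 'G' && PySem.List.pyGetD l2 i '?' == 'T' || PySem.List.pyGetD l2 i '?' == 'G' && PySem.List.pyGetD l1 i '?' == 'T' then 'K'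
          else if PySem.List.pyGetD l1 i '?' == 'A' && PySem.List.pyGetD l2 i '?' == 'C' || PySem.List.pyGetD l2 i '?' == 'A' && PySem.List.pyGetD l1 i '?' == 'C' then 'M'
          else 'N']) ([] : List Char)
    = (l1.zip l2).map (fun p => if p.1 == p.2 then p.1
        else iupacDecode.getD (iupacFlag p.1 ||| iupacFlag p.2) 'N') := by
  rw [PySem.List.foldl_append_singleton_eq_map, List.nil_append,
    map_pyRange_eq_map_zip
      (fun c1 c2 => if c1 == c2 then c1
        else if c1 == 'A' && c2 == 'G' || c2 == 'A' && c1 == 'G' then 'R'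
        else if c1 == 'C' && c2 == 'T' || c2 == 'C' && c1 == 'T' then 'Y'
        else if c1 == 'G' && c2 == 'C' || c2 == 'G' && c1 == 'C' then 'S'
        else if c1 == 'A' && c2 == 'T' || c2 == 'A' && c1 == 'T' then 'W'
        else if c1 == 'G' && c2 == 'T' || c2 == 'G' && c1 == 'T' then 'K'
        else if c1 == 'A' && c2 == 'C' || c2 == 'A' && c1 == 'C' then 'M'
        else 'N') '?' l1 l2 h]
  exact List.map_congr_left (fun p _ => iupac_char_case p.1 p.2)

-- ===== VERDICT (by name: the statement is the Claim_ definition above) =====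
theorem IUPAC_spec : Claim_equal_IUPAC := by
  intro seq1 seq2 _
  unfold Spec_IUPAC IUPAC IUPAC_alt
  by_cases h : seq1.toList.length = seq2.toList.length
  · rw [if_pos (beq_iff_eq.mpr h), if_neg (not_not_intro h),
      iupac_core seq1.toList seq2.toList h]
  · rw [if_neg (fun hc => h (beq_iff_eq.mp hc)), if_pos h]
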